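-- pv_equiv track=rewrite | github.com/DUY2602/300-bai-code-thieu-nhi | bai-010.py | dieukien
-- ===== SOURCE A (Python) =====
-- def xulychuoiinput(string, array):
--   for kytu in string:
--     intkytu = int(kytu)
--     array.append(intkytu)
--   return array
--
-- def dieukien(array):
--   if (len(array) != 9):
--     return "SIN không hợp lệ"
--
--   sokiemtra = array[8]  # Số phải nhất có vị trì index là 8 (check digit)
--   s1 = 0
--   s2 = 0
--   str_s2 = ""
--   arr_s2 = []
--
--   for i in range (0, len(array) - 2, 2):     # s1: là tổng các số vị trí lẻ
--     s1 += array[i]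
--
--   for i in range (1, len(array), 2):
--     arr_component_s2 = array[i] * 2
--     str_s2 += str(arr_component_s2)
--
--   xulychuoiinput(str_s2, arr_s2)
--
--   for i in range (0, len(arr_s2)):
--     int_i = arr_s2[int(i)]
--     s2 += int_i
--
--   trongso = s1 + s2
--
--   if ((trongso + sokiemtra) % 10 == 0):
--     return "SIN hợp lệ"
--   else:
--     return "SIN không hợp lệ"
-- ===== SOURCE B (Python) =====
-- def dieukien(array):
--     if len(array) != 9:
--         return "SIN không hợp lệ"
--     s1 = sum(array[i] for i in range(0, 7, 2))
--     s2 = 0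
--     for i in range(1, 9, 2):
--         n = abs(2 * array[i])
--         while n > 0:
--             s2 += n % 10
--             n //= 10
--     if (s1 + s2 + array[8]) % 10 == 0:
--         return "SIN hợp lệ"
--     return "SIN không hợp lệ"
-- ===== Notes on version B (the rewrite author's own statement) =====
-- stated objective: simpler
-- what changed: Replaces the string-building of str(2*array[i]), the helper that reparses each character back to an int, and the arr_s2 accumulator with a direct arithmetic digit-sum loop (n%10, n//=10) on the doubled odd-index entries.
import Mathlib
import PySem

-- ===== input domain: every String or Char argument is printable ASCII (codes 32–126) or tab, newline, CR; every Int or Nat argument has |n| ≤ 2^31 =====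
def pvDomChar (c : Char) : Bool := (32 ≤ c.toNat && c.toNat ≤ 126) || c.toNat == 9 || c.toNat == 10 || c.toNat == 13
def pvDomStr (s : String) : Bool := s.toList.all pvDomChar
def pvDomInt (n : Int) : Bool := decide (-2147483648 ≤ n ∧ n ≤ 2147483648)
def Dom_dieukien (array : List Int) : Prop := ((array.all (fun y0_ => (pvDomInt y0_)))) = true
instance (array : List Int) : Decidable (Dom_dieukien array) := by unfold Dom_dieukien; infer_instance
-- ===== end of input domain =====

-- B replaces A's str(2*d)-then-reparse-each-character digit sum with a direct arithmetic
-- digit-sum loop (n%10, n//10), dropping the intermediate string, arr_s2 and the helper (objective: simpler).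


-- ===== PORT A =====
def dieukien (array : List Int) : String :=
  if ¬ (array.length = 9) then "SIN không hợp lệ"
  else
    let sokiemtra := PySem.List.pyGetD array 8 0
    let s1 := (PySem.List.pyRange 0 ((array.length : Int) - 2) 2).foldl
      (fun s i => s + PySem.List.pyGetD array i 0) 0
    let strS2 := (PySem.List.pyRange 1 (array.length : Int) 2).foldl
      (fun s i => s ++ PySem.Int.toChars (PySem.List.pyGetD array i 0 * 2)) []
    -- xulychuoiinput: int(kytu) on each character; the getD 0 default is unreachable under Pre_
    let arrS2 := strS2.foldl (fun a c => a ++ [(PySem.Int.ofChars? [c]).getD 0]) []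
    let s2 := (PySem.List.pyRange 0 (arrS2.length : Int)).foldl
      (fun s i => s + PySem.List.pyGetD arrS2 i 0) 0
    let trongso := s1 + s2
    if PySem.Int.mod (trongso + sokiemtra) 10 = 0 then "SIN hợp lệ" else "SIN không hợp lệ"

-- ===== PORT B =====
-- digit sum of a natural number: the while n > 0: s += n % 10; n //= 10 loop of Source B,
-- with a fuel argument (n halves at least every step, so fuel n always suffices) so the
-- kernel can evaluate it; pvDigitSum_rec below is the loop's defining recurrence.
def pvDigitSumF : Nat → Nat → Int
  | 0, _ => 0
  | f + 1, n => if n = 0 then 0 else ((n % 10 : Nat) : Int) + pvDigitSumF f (n / 10)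

def pvDigitSum (n : Nat) : Int := pvDigitSumF n n

def dieukien_alt (array : List Int) : String :=
  if ¬ (array.length = 9) then "SIN không hợp lệ"
  else
    let s1 := ((PySem.List.pyRange 0 7 2).map (fun i => PySem.List.pyGetD array i 0)).sum
    let s2 := (PySem.List.pyRange 1 9 2).foldl
      (fun s i => s + pvDigitSum (2 * PySem.List.pyGetD array i 0).natAbs) 0
    if PySem.Int.mod (s1 + s2 + PySem.List.pyGetD array 8 0) 10 = 0 then "SIN hợp lệ"
    else "SIN không hợp lệ"

-- ===== PRECONDITION & SPEC =====
-- Pre_ excludes the inputs on which A raises ValueError: length-9 arrays with a negative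
-- entry at an odd index (str(2*d) then contains '-', and int('-') raises).
def Pre_dieukien (array : List Int) : Prop :=
  array.length = 9 →
    (0 ≤ PySem.List.pyGetD array 1 0 ∧ 0 ≤ PySem.List.pyGetD array 3 0 ∧
     0 ≤ PySem.List.pyGetD array 5 0 ∧ 0 ≤ PySem.List.pyGetD array 7 0)
instance (array : List Int) : Decidable (Pre_dieukien array) := by unfold Pre_dieukien; infer_instance

def pvWitness_dieukien : List Int := [1, 2, 3, 4, 5, 6, 7, 8, 9]

def Spec_dieukien (array : List Int) (out : String) : Prop := out = dieukien_alt array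
instance (array : List Int) (out : String) : Decidable (Spec_dieukien array out) := by unfold Spec_dieukien; infer_instance

-- ===== CLAIM (what is proved, stated in full; the proofs are below) =====
def Claim_equal_dieukien : Prop := ∀ (array : List Int), Dom_dieukien array → Pre_dieukien array → Spec_dieukien array (dieukien array)

-- ===== LEMMAS AND PROOFS =====

lemma pvDigitSumF_zero (f : Nat) : pvDigitSumF f 0 = 0 := by
  cases f <;> simp [pvDigitSumF]

lemma pvDigitSumF_congr (n : Nat) : ∀ (f g : Nat), n ≤ f → n ≤ g → pvDigitSumF f n = pvDigitSumF g n := by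
  induction n using Nat.strong_induction_on with
  | _ n ih =>
    intro f g hf hg
    by_cases hn : n = 0
    · subst hn; rw [pvDigitSumF_zero, pvDigitSumF_zero]
    · match f, g, hf, hg with
      | 0, _, hf, _ => exact absurd (Nat.le_zero.mp hf) hn
      | _ + 1, 0, _, hg => exact absurd (Nat.le_zero.mp hg) hn
      | f + 1, g + 1, _, _ =>
        simp only [pvDigitSumF]
        rw [if_neg hn, if_neg hn]
        rw [ih (n / 10) (Nat.div_lt_self (by omega) (by norm_num)) f g (by omega) (by omega)]

lemma pvDigitSum_rec (n : Nat) (hn : n ≠ 0) :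
    pvDigitSum n = ((n % 10 : Nat) : Int) + pvDigitSum (n / 10) := by
  match n, hn with
  | m + 1, _ =>
    show pvDigitSumF (m + 1) (m + 1) = _
    simp only [pvDigitSumF]
    rw [if_neg (Nat.succ_ne_zero m), pvDigitSumF_congr ((m + 1) / 10) m ((m + 1) / 10)
      (by omega) (le_refl _)]
    rfl

-- the value A's reparse assigns to a decimal digit character
def pvDigitVal (c : Char) : Int := (PySem.Int.ofChars? [c]).getD 0

lemma pvDigitVal_digitChar (d : Nat) (hd : d < 10) :
    pvDigitVal (Nat.digitChar d) = (d : Int) := by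
  interval_cases d <;> decide

lemma pv_toDigitsCore_sum (fuel : Nat) :
    ∀ (n : Nat) (ds : List Char), n < fuel →
      ((Nat.toDigitsCore 10 fuel n ds).map pvDigitVal).sum
        = pvDigitSum n + ((ds.map pvDigitVal)).sum := by
  induction fuel with
  | zero => intro n ds h; omega
  | succ f ih =>
    intro n ds h
    rw [Nat.toDigitsCore]
    by_cases h0 : n / 10 = 0
    · simp only [h0, if_true, List.map_cons, List.sum_cons]
      rw [pvDigitVal_digitChar _ (Nat.mod_lt _ (by norm_num))]
      by_cases hn : n = 0
      · simp [hn, pvDigitSum, pvDigitSumF]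
      · rw [pvDigitSum_rec n hn, h0]
        simp [pvDigitSum, pvDigitSumF]
    · simp only [h0, if_false]
      rw [ih (n / 10) _ (by omega)]
      have hn : n ≠ 0 := by intro hc; simp [hc] at h0
      rw [pvDigitSum_rec n hn]
      simp [pvDigitVal_digitChar _ (Nat.mod_lt _ (by norm_num))]
      ring

lemma pv_toDigits_sum (m : Nat) :
    ((Nat.toDigits 10 m).map pvDigitVal).sum = pvDigitSum m := by
  rw [Nat.toDigits, pv_toDigitsCore_sum (m + 1) m [] (Nat.lt_succ_self m)]
  simp

-- A's per-entry contribution to s2 equals B's arithmetic digit sum, for a nonnegative entry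
lemma pv_block_sum (a : Int) (ha : 0 ≤ a) :
    ((PySem.Int.toChars (a * 2)).map pvDigitVal).sum = pvDigitSum (2 * a).natAbs := by
  have h2 : ¬ (a * 2 < 0) := by omega
  rw [PySem.Int.toChars, if_neg h2, pv_toDigits_sum]
  congr 1
  omega

-- A's final summation loop over range(0, len(arr_s2)) is the list sum
lemma pv_sum_loop (xs : List Int) :
    List.foldl (fun s i => s + PySem.List.pyGetD xs i 0) 0 (PySem.List.pyRange 0 (xs.length : Int)) = xs.sum := by
  have h := PySem.List.foldl_pyRange_pyGetD xs 0 (fun s x => s + x) 0 (le_refl 0)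
  simp only [PySem.List.len] at h
  rw [h]
  simp [List.sum_eq_foldl]

-- the two ports agree on every 9-element list whose odd-index entries are nonnegative
lemma pv_main (a0 a1 a2 a3 a4 a5 a6 a7 a8 : Int)
    (h1 : 0 ≤ a1) (h3 : 0 ≤ a3) (h5 : 0 ≤ a5) (h7 : 0 ≤ a7) :
    dieukien [a0, a1, a2, a3, a4, a5, a6, a7, a8] = dieukien_alt [a0, a1, a2, a3, a4, a5, a6, a7, a8] := by
  simp only [dieukien, dieukien_alt, List.length_cons, List.length_nil, Nat.reduceAdd,
    Nat.cast_ofNat, Int.reduceSub, not_true, if_false,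
    show PySem.List.pyRange 0 7 2 = [0, 2, 4, 6] from by decide,
    show PySem.List.pyRange 1 9 2 = [1, 3, 5, 7] from by decide,
    List.foldl_cons, List.foldl_nil, List.map_cons, List.map_nil, List.nil_append,
    PySem.List.pyGetD_ofNat', List.getD, List.getElem?_cons_zero, List.getElem?_cons_succ,
    Option.getD_some, List.sum_cons, List.sum_nil]
  rw [show (fun (a : List Int) (c : Char) => a ++ [(PySem.Int.ofChars? [c]).getD 0])
        = (fun a c => a ++ [pvDigitVal c]) from rfl]
  simp only [PySem.List.foldl_append_singleton_eq_map pvDigitVal, List.nil_append]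
  simp only [pv_sum_loop]
  simp only [List.map_append, List.sum_append, pv_block_sum a1 h1, pv_block_sum a3 h3,
    pv_block_sum a5 h5, pv_block_sum a7 h7]
  ring_nf

-- ===== VERDICT (by name: the statement is the Claim_ definition above) =====
theorem dieukien_spec : Claim_equal_dieukien := by
  intro array _ hpre
  unfold Spec_dieukien
  rcases array with _ | ⟨a0, _ | ⟨a1, _ | ⟨a2, _ | ⟨a3, _ | ⟨a4, _ | ⟨a5, _ | ⟨a6, _ | ⟨a7, _ | ⟨a8, _ | ⟨a9, tl⟩⟩⟩⟩⟩⟩⟩⟩⟩⟩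
  case nil => simp [dieukien, dieukien_alt]
  case cons.nil => simp [dieukien, dieukien_alt]
  case cons.cons.nil => simp [dieukien, dieukien_alt]
  case cons.cons.cons.nil => simp [dieukien, dieukien_alt]
  case cons.cons.cons.cons.nil => simp [dieukien, dieukien_alt]
  case cons.cons.cons.cons.cons.nil => simp [dieukien, dieukien_alt]
  case cons.cons.cons.cons.cons.cons.nil => simp [dieukien, dieukien_alt]
  case cons.cons.cons.cons.cons.cons.cons.nil => simp [dieukien, dieukien_alt]
  case cons.cons.cons.cons.cons.cons.cons.cons.nil => simp [dieukien, dieukien_alt]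
  case cons.cons.cons.cons.cons.cons.cons.cons.cons.cons =>
    simp [dieukien, dieukien_alt]
  case cons.cons.cons.cons.cons.cons.cons.cons.cons.nil =>
    obtain ⟨h1, h3, h5, h7⟩ := hpre rfl
    exact pv_main a0 a1 a2 a3 a4 a5 a6 a7 a8
      (by simpa [PySem.List.pyGetD_ofNat'] using h1)
      (by simpa [PySem.List.pyGetD_ofNat'] using h3)
      (by simpa [PySem.List.pyGetD_ofNat'] using h5)
      (by simpa [PySem.List.pyGetD_ofNat'] using h7)
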